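-- pv_equiv track=rewrite | github.com/Chukwudebelu/HackerRank | Mathematics/Algebra/Tell_the_Average/TellTheAverage5.py | value_of_S_recursive2
-- ===== SOURCE A (Python) =====
-- def value_of_S_recursive2(L: list) -> int:
--     if (len(L) == 0):    # empty list: L = []
--         return 0
--     elif (len(L) == 1):  # unary list: L = [a]
--         return L[0]
--     else:           # other lists: L = [a, b, ...]
--         a, b = L[:2]    # a, b = [L[0], L[1]]
--         L.pop(1)
--         L[0] = ((a + 1)*(b + 1) - 1) % (1000000007)  # a + b + ab = (a + 1)(b + 1) -1
--         return value_of_S_recursive2(L)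
-- ===== SOURCE B (Python) =====
-- def value_of_S_recursive2(L: list) -> int:
--     # Single modular product pass instead of A's recursive pop-and-rewrite.
--     # Note: does not mutate L (A empties L down to one element).
--     if len(L) == 0:
--         return 0
--     if len(L) == 1:
--         return L[0]
--     p = 1000000007
--     acc = 1
--     for x in L:
--         acc = acc * (x + 1) % p
--     return (acc - 1) % p
-- ===== Notes on version B (the rewrite author's own statement) =====
-- stated objective: faster
-- what changed: Replaces the recursive pop(1)-and-rewrite fold (O(n) list shifts per step, plus recursion-depth n) by a single iterative modular product of (x+1) followed by one final subtraction mod 1000000007; B does not mutate L.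
import Mathlib
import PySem

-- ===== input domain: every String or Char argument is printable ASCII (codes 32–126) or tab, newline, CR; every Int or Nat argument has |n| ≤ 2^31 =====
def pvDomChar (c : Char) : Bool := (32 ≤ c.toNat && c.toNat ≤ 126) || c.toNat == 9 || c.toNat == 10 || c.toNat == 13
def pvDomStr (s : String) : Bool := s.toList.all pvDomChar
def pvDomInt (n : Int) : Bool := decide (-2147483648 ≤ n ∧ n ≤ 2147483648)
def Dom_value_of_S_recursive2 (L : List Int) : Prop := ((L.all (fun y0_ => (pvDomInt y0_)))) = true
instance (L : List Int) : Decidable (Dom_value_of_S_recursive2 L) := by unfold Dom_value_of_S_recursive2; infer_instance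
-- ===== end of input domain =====

-- B replaces A's recursive pop(1)-and-rewrite fold by one iterative modular product
-- of (x+1) minus 1; return value only — A mutates its argument list, B does not.

-- ===== PORT A =====
def value_of_S_recursive2 : List Int → Int
  | [] => 0
  | [a] => a
  | a :: b :: rest =>
      value_of_S_recursive2 (PySem.Int.mod ((a + 1) * (b + 1) - 1) 1000000007 :: rest)
termination_by L => L.length

-- ===== PORT B =====
def value_of_S_recursive2_alt (L : List Int) : Int :=
  match L with
  | [] => 0
  | [a] => a
  | _ =>
      PySem.Int.mod
        ((L.foldl (fun acc x => PySem.Int.mod (acc * (x + 1)) 1000000007) 1) - 1)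
        1000000007

-- ===== PRECONDITION & SPEC =====
def Spec_value_of_S_recursive2 (L : List Int) (out : Int) : Prop := out = value_of_S_recursive2_alt L
instance (L : List Int) (out : Int) : Decidable (Spec_value_of_S_recursive2 L out) := by unfold Spec_value_of_S_recursive2; infer_instance

-- ===== CLAIM (what is proved, stated in full; the proofs are below) =====
def Claim_equal_value_of_S_recursive2 : Prop := ∀ (L : List Int), Dom_value_of_S_recursive2 L → Spec_value_of_S_recursive2 L (value_of_S_recursive2 L)

-- ===== LEMMAS AND PROOFS =====

-- both programs compute ((∏ (x+1)) - 1) % p on lists of length ≥ 2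
theorem A_prod (rest : List Int) : ∀ a b : Int,
    value_of_S_recursive2 (a :: b :: rest) =
      ((a + 1) * (b + 1) * ((rest.map (· + 1)).prod) - 1) % 1000000007 := by
  induction rest with
  | nil =>
      intro a b
      simp [value_of_S_recursive2]
  | cons c t ih =>
      intro a b
      rw [value_of_S_recursive2, ih]
      have hmod : PySem.Int.mod ((a + 1) * (b + 1) - 1) 1000000007
          = ((a + 1) * (b + 1) - 1) % 1000000007 :=
        PySem.Int.mod_eq_emod_of_pos (by norm_num)
      rw [hmod]
      have h1 : ((((a+1)*(b+1)-1) % 1000000007 + 1)) ≡ ((a+1)*(b+1)) [ZMOD 1000000007] := by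
        have : (((a+1)*(b+1)-1) % 1000000007) ≡ ((a+1)*(b+1)-1) [ZMOD 1000000007] :=
          Int.emod_emod_of_dvd _ dvd_rfl
        simpa using this.add_right 1
      have h2 := ((h1.mul_right ((c + 1) * (t.map (· + 1)).prod)).sub_right 1)
      have := h2
      simp only [Int.ModEq] at this
      simp only [List.map_cons, List.prod_cons]
      rw [← this]; ring_nf

theorem B_fold (l : List Int) : ∀ acc : Int, l ≠ [] →
    l.foldl (fun acc x => PySem.Int.mod (acc * (x + 1)) 1000000007) acc =
      (acc * (l.map (· + 1)).prod) % 1000000007 := by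
  induction l with
  | nil => intro acc h; exact absurd rfl h
  | cons x t ih =>
      intro acc _
      simp only [List.foldl_cons]
      have hmod : PySem.Int.mod (acc * (x + 1)) 1000000007
          = (acc * (x + 1)) % 1000000007 := PySem.Int.mod_eq_emod_of_pos (by norm_num)
      rcases eq_or_ne t [] with rfl | ht
      · simp [List.foldl]
      · rw [ih _ ht, hmod]
        have : ((acc * (x + 1)) % 1000000007) ≡ (acc * (x + 1)) [ZMOD 1000000007] :=
          Int.emod_emod_of_dvd _ dvd_rfl
        have h2 := this.mul_right ((t.map (· + 1)).prod)
        simp only [Int.ModEq] at h2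
        rw [h2]
        simp [List.prod_cons, mul_assoc]

-- ===== VERDICT (by name: the statement is the Claim_ definition above) =====
theorem value_of_S_recursive2_spec : Claim_equal_value_of_S_recursive2 := by
  intro L _
  unfold Spec_value_of_S_recursive2
  match L with
  | [] => simp [value_of_S_recursive2, value_of_S_recursive2_alt]
  | [a] => simp [value_of_S_recursive2, value_of_S_recursive2_alt]
  | a :: b :: rest =>
      rw [A_prod rest a b]
      show _ = value_of_S_recursive2_alt (a :: b :: rest)
      unfold value_of_S_recursive2_alt
      simp only []
      rw [B_fold (a :: b :: rest) 1 (by simp),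
        PySem.Int.mod_eq_emod_of_pos (by norm_num)]
      have : ((1 * ((a :: b :: rest).map (· + 1)).prod) % 1000000007) ≡
          (1 * ((a :: b :: rest).map (· + 1)).prod) [ZMOD 1000000007] :=
        Int.emod_emod_of_dvd _ dvd_rfl
      have h2 := this.sub_right 1
      simp only [Int.ModEq] at h2
      rw [h2]
      simp [List.map_cons, List.prod_cons, mul_assoc]
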